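-- pv_equiv track=rewrite | github.com/bradtreloar/freeCodeCamp_DP_problems | problems/tabulated/how_construct.py | how_construct
-- ===== SOURCE A (Python) =====
-- from typing import List, Optional, Tuple, cast
--
-- def how_construct(target_string: str, strings: List[str]) -> Optional[List[str]]:
--     n = len(target_string) + 1
--     table: List[Optional[List[str]]] = [
--         [] if i == 0 else None for i in range(n)]
--     for i in range(n):
--         if table[i] is not None:
--             for string in strings:
--                 j = i + len(string)
--                 if j < n and target_string[i: j] == string:
--                     table[j] = [*cast(List[str], table[i]), string]
--     return table[len(target_string)]
-- ===== SOURCE B (Python) =====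
-- def how_construct(target_string, strings):
--     n = len(target_string)
--     back = [None] * (n + 1)
--     reachable = [False] * (n + 1)
--     reachable[0] = True
--     for i in range(n + 1):
--         if reachable[i]:
--             for s in strings:
--                 j = i + len(s)
--                 if s and j <= n and target_string[i:j] == s:
--                     back[j] = s
--                     reachable[j] = True
--     if not reachable[n]:
--         return None
--     parts = []
--     j = n
--     while j > 0:
--         s = back[j]
--         parts.append(s)
--         j -= len(s)
--     parts.reverse()
--     return parts
-- ===== Notes on version B (the rewrite author's own statement) =====
-- stated objective: faster
-- what changed: A stores a full construction list per table cell and copies table[i]+[s] on every write (quadratic list copying); B stores one back-pointer string per position plus a reachability flag and reconstructs the answer in a single backward pass, skipping empty strings.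
-- intended difference: On inputs where strings contains '' and target_string is constructible from the nonempty strings, A returns a construction list padded with spurious '' entries (its table rows keep appending '' to themselves), while B returns the construction without empty strings, which is the intended witness list. — e.g. on how_construct("a", ["a", ""]): A returns some ["a", ""], B returns some ["a"]
import Mathlib
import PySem

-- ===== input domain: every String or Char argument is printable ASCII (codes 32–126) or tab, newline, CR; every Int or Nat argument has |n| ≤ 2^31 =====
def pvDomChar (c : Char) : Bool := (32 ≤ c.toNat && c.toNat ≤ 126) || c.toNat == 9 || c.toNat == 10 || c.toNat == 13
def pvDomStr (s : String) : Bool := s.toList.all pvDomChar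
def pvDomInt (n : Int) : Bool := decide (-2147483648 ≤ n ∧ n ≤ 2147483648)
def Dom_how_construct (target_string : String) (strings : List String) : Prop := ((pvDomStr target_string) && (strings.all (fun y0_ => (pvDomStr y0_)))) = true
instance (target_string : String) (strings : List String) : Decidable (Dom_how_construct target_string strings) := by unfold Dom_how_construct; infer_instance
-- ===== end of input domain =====

-- B replaces A's table of partial result lists (quadratic list copying) by a back-pointer array
-- plus a single reconstruction pass (objective: faster); where strings contains '' (see D_ below)
-- B intentionally drops A's spurious '' padding.


-- ===== PORT A =====
def how_construct (target_string : String) (strings : List String) : Option (List String) :=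
  let n : Int := PySem.Str.len target_string + 1
  let table : List (Option (List String)) :=
    (PySem.List.pyRange 0 n 1).map (fun i => if i = 0 then some ([] : List String) else none)
  let table :=
    (PySem.List.pyRange 0 n 1).foldl
      (fun table i =>
        if (PySem.List.pyGetD table i none).isSome then
          strings.foldl
            (fun table s =>
              let j : Int := i + PySem.Str.len s
              if j < n ∧ PySem.Str.slice target_string (some i) (some j) == s then
                -- Python re-reads table[i] here; it is non-None (guard above, writes only add some), so '.getD []' is never used
                PySem.List.pySetD table j (some ((PySem.List.pyGetD table i none).getD [] ++ [s]))
              else table)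
            table
        else table)
      table
  PySem.List.pyGetD table (PySem.Str.len target_string) none

-- ===== PORT B =====
-- the 'while j > 0' reconstruction loop of Source B; runs at most n+1 times (each stored string is
-- nonempty), so fuel n+1 is exact; the 'none' fallback is unreachable on the states B builds
def pvReconAux (back : List (Option String)) : Nat → Nat → List String → List String
  | 0, _, parts => parts.reverse
  | fuel + 1, j, parts =>
    if j = 0 then parts.reverse
    else
      match PySem.List.pyGetD back (j : Int) none with
      | some s => pvReconAux back fuel (j - s.toList.length) (parts ++ [s])
      | none => parts.reverse

def how_construct_alt (target_string : String) (strings : List String) : Option (List String) :=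
  let n : Int := PySem.Str.len target_string
  let back : List (Option String) := List.replicate (n + 1).toNat (none : Option String)
  let reachable : List Bool := PySem.List.pySetD (List.replicate (n + 1).toNat false) 0 true
  let st :=
    (PySem.List.pyRange 0 (n + 1) 1).foldl
      (fun (st : List (Option String) × List Bool) i =>
        if PySem.List.pyGetD st.2 i false then
          strings.foldl
            (fun (st : List (Option String) × List Bool) s =>
              let j : Int := i + PySem.Str.len s
              if ¬s = "" ∧ j ≤ n ∧ PySem.Str.slice target_string (some i) (some j) == s then
                (PySem.List.pySetD st.1 j (some s), PySem.List.pySetD st.2 j true)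
              else st)
            st
        else st)
      (back, reachable)
  if PySem.List.pyGetD st.2 n false then
    some (pvReconAux st.1 (n.toNat + 1) n.toNat [])
  else none

-- ===== PRECONDITION & SPEC =====
-- 'cs is a concatenation of nonempty elements of strings' (fuel ≥ cs.length always suffices)
def pvCM (strings : List String) : Nat → List Char → Bool
  | _, [] => true
  | 0, _ :: _ => false
  | f + 1, c :: cs =>
    strings.any fun s =>
      !s.toList.isEmpty && s.toList.isPrefixOf (c :: cs)
        && pvCM strings f ((c :: cs).drop s.toList.length)

-- On inputs where strings contains '' and target_string is a concatenation of nonempty elements of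
-- strings, A returns a construction list padded with spurious '' entries (its table rows keep
-- appending the empty string to themselves), while B returns the construction without empty
-- strings, which is the intended witness list.
def D_how_construct (target_string : String) (strings : List String) : Prop :=
  "" ∈ strings ∧ pvCM strings target_string.toList.length target_string.toList = true
instance (target_string : String) (strings : List String) : Decidable (D_how_construct target_string strings) := by unfold D_how_construct; infer_instance

def Spec_how_construct (target_string : String) (strings : List String) (out : Option (List String)) : Prop := ¬ D_how_construct target_string strings → out = how_construct_alt target_string strings
instance (target_string : String) (strings : List String) (out : Option (List String)) : Decidable (Spec_how_construct target_string strings out) := by unfold Spec_how_construct; infer_instance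

def pvDiffWitness_how_construct : String × List String := ("a", ["a", ""])
def pvDiffWitnessOut_how_construct : (Option (List String)) × (Option (List String)) := (some ["a", ""], some ["a"])

-- ===== CLAIM (what is proved, stated in full; the proofs are below) =====
def Claim_unchanged_how_construct : Prop := ∀ (target_string : String) (strings : List String), Dom_how_construct target_string strings → Spec_how_construct target_string strings (how_construct target_string strings)
def Claim_changed_how_construct : Prop := Dom_how_construct (pvDiffWitness_how_construct.1) (pvDiffWitness_how_construct.2) ∧ D_how_construct (pvDiffWitness_how_construct.1) (pvDiffWitness_how_construct.2) ∧ how_construct (pvDiffWitness_how_construct.1) (pvDiffWitness_how_construct.2) = pvDiffWitnessOut_how_construct.1 ∧ how_construct_alt (pvDiffWitness_how_construct.1) (pvDiffWitness_how_construct.2) = pvDiffWitnessOut_how_construct.2 ∧ pvDiffWitnessOut_how_construct.1 ≠ pvDiffWitnessOut_how_construct.2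

-- ===== LEMMAS AND PROOFS =====

-- Nat-indexed restatements of the two loop bodies (proved equal to the ports' Int-indexed folds)
def pvInnerA (t : String) (LT u : Nat) (table : List (Option (List String))) (s : String) : List (Option (List String)) :=
  let j := u + s.toList.length
  if j ≤ LT ∧ (PySem.Str.slice t (some (u : Int)) (some (j : Int)) == s) then
    table.set j (some ((table.getD u none).getD [] ++ [s]))
  else table

def pvStepA (t : String) (ss : List String) (LT : Nat) (table : List (Option (List String))) (u : Nat) : List (Option (List String)) :=
  if (table.getD u none).isSome then ss.foldl (pvInnerA t LT u) table else table

def pvInnerB (t : String) (LT u : Nat) (st : List (Option String) × List Bool) (s : String) : List (Option String) × List Bool :=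
  let j := u + s.toList.length
  if ¬s = "" ∧ j ≤ LT ∧ (PySem.Str.slice t (some (u : Int)) (some (j : Int)) == s) then
    (st.1.set j (some s), st.2.set j true)
  else st

def pvStepB (t : String) (ss : List String) (LT : Nat) (st : List (Option String) × List Bool) (u : Nat) : List (Option String) × List Bool :=
  if st.2.getD u false then ss.foldl (pvInnerB t LT u) st else st

-- reconstruction along back-pointers, as an Option-valued function
def pvRecF (back : List (Option String)) : Nat → Nat → Option (List String)
  | 0, _ => none
  | f + 1, j =>
    if j = 0 then some []
    else
      match back.getD j none with
      | some s =>
        if 1 ≤ s.toList.length ∧ s.toList.length ≤ j then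
          (pvRecF back f (j - s.toList.length)).map (· ++ [s])
        else none
      | none => none

-- the simulation invariant: u is a bound on the stages processed so far
def pvInv (t : String) (ss : List String) (u : Nat) (table : List (Option (List String))) (back : List (Option String)) (reach : List Bool) : Prop :=
  table.length = t.toList.length + 1 ∧ back.length = t.toList.length + 1 ∧ reach.length = t.toList.length + 1 ∧
  (∀ j, j < t.toList.length + 1 → reach.getD j false = (table.getD j none).isSome) ∧
  (∀ j, j < t.toList.length + 1 → reach.getD j false = true → pvCM ss j (t.toList.take j) = true) ∧
  (∀ j s, back.getD j none = some s → 1 ≤ s.toList.length ∧ s.toList.length ≤ j ∧ j - s.toList.length ≤ u) ∧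
  ("" ∉ ss → ∀ j, j < t.toList.length + 1 → table.getD j none = pvRecF back (t.toList.length + 1) j)

lemma pvBridgeA (t : String) (ss : List String) :
    how_construct t ss =
      ((List.range (t.toList.length + 1)).foldl (pvStepA t ss t.toList.length)
        (some [] :: List.replicate t.toList.length none)).getD t.toList.length none := by
  simp only [how_construct, PySem.Str.len_eq]
  have hcast : ((t.toList.length : Int) + 1) = ((t.toList.length + 1 : Nat) : Int) := by push_cast; ring
  rw [hcast, PySem.List.pyRange_zero_nat, List.map_map, List.foldl_map, PySem.List.pyGetD_natCast]
  have hinit : (List.range (t.toList.length + 1)).map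
      ((fun i : Int => if i = 0 then some ([] : List String) else none) ∘ (fun k : Nat => (k : Int)))
      = some [] :: List.replicate t.toList.length none := by
    rw [List.range_succ_eq_map]
    simp [List.map_map, Function.comp_def]
  rw [hinit]
  congr 1
  apply PySem.List.foldl_congr_mem
  intro table k _
  show (if (PySem.List.pyGetD table (k : Int) none).isSome then _ else _) = pvStepA t ss t.toList.length table k
  rw [PySem.List.pyGetD_natCast]
  unfold pvStepA
  by_cases hg : (table.getD k none).isSome
  · rw [if_pos hg, if_pos hg]
    apply PySem.List.foldl_congr_mem
    intro tb s _
    show (if ((k : Int) + PySem.Str.len s) < ((t.toList.length : Int) + 1) ∧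
        (PySem.Str.slice t (some (k : Int)) (some ((k : Int) + PySem.Str.len s)) == s) then _ else _)
      = pvInnerA t t.toList.length k tb s
    unfold pvInnerA
    rw [PySem.Str.len_eq]
    have hj : ((k : Int) + (s.toList.length : Int)) = ((k + s.toList.length : Nat) : Int) := by push_cast; ring
    rw [hj]
    apply if_congr
    · apply and_congr_left'
      constructor
      · intro h
        have h' : k + s.toList.length < t.toList.length + 1 := by exact_mod_cast h
        omega
      · intro h
        have h' : k + s.toList.length < t.toList.length + 1 := by omega
        exact_mod_cast h'
    · rw [PySem.List.pySetD_natCast, PySem.List.pyGetD_natCast]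
    · rfl
  · rw [if_neg hg, if_neg hg]
lemma pvBridgeB (t : String) (ss : List String) :
    how_construct_alt t ss =
      (if ((List.range (t.toList.length + 1)).foldl (pvStepB t ss t.toList.length)
            (List.replicate (t.toList.length + 1) none,
              (List.replicate (t.toList.length + 1) false).set 0 true)).2.getD t.toList.length false then
         some (pvReconAux
           ((List.range (t.toList.length + 1)).foldl (pvStepB t ss t.toList.length)
             (List.replicate (t.toList.length + 1) none,
               (List.replicate (t.toList.length + 1) false).set 0 true)).1
           (t.toList.length + 1) t.toList.length [])
       else none) := by
  simp only [how_construct_alt, PySem.Str.len_eq]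
  have hcast : ((t.toList.length : Int) + 1) = ((t.toList.length + 1 : Nat) : Int) := by push_cast; ring
  rw [hcast, PySem.List.pyRange_zero_nat, List.foldl_map]
  simp only [Int.toNat_natCast]
  have heq : ∀ (m : Nat), PySem.List.pySetD (List.replicate m false) (0 : Int) true
      = (List.replicate m false).set 0 true := by
    intro m
    rw [PySem.List.pySetD_of_nonneg _ _ (by omega)]
    norm_num
  rw [heq]
  simp only [PySem.List.pyGetD_natCast]
  have hfold : ∀ init : List (Option String) × List Bool,
      (List.range (t.toList.length + 1)).foldl
        (fun st k =>
          if st.2.getD k false then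
            ss.foldl
              (fun (st : List (Option String) × List Bool) s =>
                if ¬s = "" ∧ ((k : Nat) : Int) + ((s.toList.length : Nat) : Int) ≤ (t.toList.length : Int) ∧
                    PySem.Str.slice t (some ((k : Nat) : Int)) (some (((k : Nat) : Int) + ((s.toList.length : Nat) : Int))) == s then
                  (PySem.List.pySetD st.1 (((k : Nat) : Int) + ((s.toList.length : Nat) : Int)) (some s),
                   PySem.List.pySetD st.2 (((k : Nat) : Int) + ((s.toList.length : Nat) : Int)) true)
                else st) st
          else st) init
      = (List.range (t.toList.length + 1)).foldl (pvStepB t ss t.toList.length) init := by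
    intro init
    apply PySem.List.foldl_congr_mem
    intro st k _
    unfold pvStepB
    by_cases hg : st.2.getD k false
    · rw [if_pos hg, if_pos hg]
      apply PySem.List.foldl_congr_mem
      intro st' s _
      unfold pvInnerB
      have hj : ((k : Int) + (s.toList.length : Int)) = ((k + s.toList.length : Nat) : Int) := by
        push_cast; ring
      rw [hj]
      apply if_congr
      · apply and_congr_right'
        apply and_congr_left'
        constructor
        · intro h; exact_mod_cast h
        · intro h; exact_mod_cast h
      · rw [PySem.List.pySetD_natCast, PySem.List.pySetD_natCast]
      · rfl
    · rw [if_neg hg, if_neg hg]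
  rw [hfold]


lemma pvRecF_fuel (back : List (Option String)) :
    ∀ f f' j, j < f → j < f' → pvRecF back f j = pvRecF back f' j := by
  intro f
  induction f with
  | zero => omega
  | succ f ih =>
    intro f' j hf hf'
    match f', hf' with
    | f' + 1, _ =>
      show pvRecF back (f + 1) j = pvRecF back (f' + 1) j
      simp only [pvRecF, String.length_toList]
      by_cases hj : j = 0
      · simp [hj]
      · simp only [if_neg hj]
        cases hb : back.getD j none with
        | none => rfl
        | some s =>
          by_cases hbd : 1 ≤ s.length ∧ s.length ≤ j
          · simp only [if_pos hbd]
            rw [ih f' (j - s.length) (by omega) (by omega)]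
          · simp [if_neg hbd]

lemma pvRecF_set_high (back : List (Option String)) (j0 : Nat) (x : Option String) :
    ∀ f j, j < j0 → pvRecF (back.set j0 x) f j = pvRecF back f j := by
  intro f
  induction f with
  | zero => intro j _; rfl
  | succ f ih =>
    intro j hj
    simp only [pvRecF, String.length_toList]
    by_cases hj0 : j = 0
    · simp [hj0]
    · have hne : j0 ≠ j := by omega
      simp only [if_neg hj0, List.getD_eq_getElem?_getD, List.getElem?_set_ne hne]
      cases hb : back[j]?.getD none with
      | none => rfl
      | some s =>
        by_cases hbd : 1 ≤ s.length ∧ s.length ≤ j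
        · simp only [if_pos hbd]
          rw [ih (j - s.length) (by omega)]
        · simp [if_neg hbd]

lemma pvInv_weaken (t : String) (ss : List String) (u : Nat) {tb bk rc}
    (h : pvInv t ss u tb bk rc) : pvInv t ss (u + 1) tb bk rc := by
  obtain ⟨h1, h2, h3, h4, h5, h6, h7⟩ := h
  refine ⟨h1, h2, h3, h4, h5, fun j s hjs => ?_, h7⟩
  obtain ⟨a, b, c⟩ := h6 j s hjs
  exact ⟨a, b, by omega⟩

lemma pvGetD_set_self {α : Type} (xs : List α) (i : Nat) (v d : α) (h : i < xs.length) :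
    (xs.set i v).getD i d = v := by
  simp [List.getD_eq_getElem?_getD, List.getElem?_set_self h]

lemma pvGetD_set_ne {α : Type} (xs : List α) (i j : Nat) (v d : α) (h : i ≠ j) :
    (xs.set i v).getD j d = xs.getD j d := by
  simp [List.getD_eq_getElem?_getD, List.getElem?_set_ne h]

lemma pvCM_mono (ss : List String) :
    ∀ f f' (cs : List Char), f ≤ f' → pvCM ss f cs = true → pvCM ss f' cs = true := by
  intro f
  induction f with
  | zero =>
    intro f' cs _ h
    cases cs with
    | nil => cases f' <;> rfl
    | cons c cs => exact absurd h (by simp [pvCM])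
  | succ f ih =>
    intro f' cs hle h
    cases cs with
    | nil => cases f' <;> rfl
    | cons c cs =>
      match f', hle with
      | f' + 1, _ =>
        simp only [pvCM, List.any_eq_true] at h ⊢
        obtain ⟨s, hs, hb⟩ := h
        refine ⟨s, hs, ?_⟩
        simp only [Bool.and_eq_true] at hb ⊢
        exact ⟨hb.1, ih f' _ (by omega) hb.2⟩

lemma pvCM_append (ss : List String) :
    ∀ f (cs : List Char) (s : String), s ∈ ss → s ≠ "" → pvCM ss f cs = true →
      pvCM ss (f + 1) (cs ++ s.toList) = true := by
  intro f
  induction f with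
  | zero =>
    intro cs s hs hne h
    cases cs with
    | cons c cs => exact absurd h (by simp [pvCM])
    | nil =>
      have hsl : s.toList ≠ [] := fun e => hne (String.toList_eq_nil_iff.mp e)
      cases he : s.toList with
      | nil => exact absurd he hsl
      | cons c cs' =>
        simp only [List.nil_append, pvCM, List.any_eq_true]
        refine ⟨s, hs, ?_⟩
        simp only [Bool.and_eq_true, he]
        refine ⟨⟨by simp, by simp [List.isPrefixOf_iff_prefix]⟩, ?_⟩
        have : (c :: cs').drop (c :: cs').length = [] := by simp
        rw [this]
        rfl
  | succ f ih =>
    intro cs s hs hne h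
    cases cs with
    | nil =>
      have hsl : s.toList ≠ [] := fun e => hne (String.toList_eq_nil_iff.mp e)
      cases he : s.toList with
      | nil => exact absurd he hsl
      | cons c cs' =>
        simp only [List.nil_append, pvCM, List.any_eq_true]
        refine ⟨s, hs, ?_⟩
        simp only [Bool.and_eq_true, he]
        refine ⟨⟨by simp, by simp [List.isPrefixOf_iff_prefix]⟩, ?_⟩
        have : (c :: cs').drop (c :: cs').length = [] := by simp
        rw [this]
        rfl
    | cons c cs =>
      simp only [pvCM, List.any_eq_true] at h
      obtain ⟨s', hs', hb⟩ := h
      simp only [Bool.and_eq_true] at hb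
      obtain ⟨⟨hne', hpre⟩, hrec⟩ := hb
      have hlen : s'.toList.length ≤ (c :: cs).length :=
        (List.isPrefixOf_iff_prefix.mp hpre).length_le
      show pvCM ss (f + 1 + 1) ((c :: cs) ++ s.toList) = true
      simp only [List.cons_append, pvCM, List.any_eq_true]
      refine ⟨s', hs', ?_⟩
      simp only [Bool.and_eq_true]
      refine ⟨⟨hne', ?_⟩, ?_⟩
      · rw [List.isPrefixOf_iff_prefix] at hpre ⊢
        rw [← List.cons_append]
        exact hpre.trans (List.prefix_append _ _)
      · rw [← List.cons_append, List.drop_append_of_le_length hlen]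
        exact ih _ s hs hne hrec

lemma pvInner_step (t : String) (ss : List String) (u : Nat) (s : String) (hs : s ∈ ss)
    (hu : u < t.toList.length + 1) {table back reach}
    (h : pvInv t ss u table back reach) (hru : reach.getD u false = true) :
    pvInv t ss u (pvInnerA t t.toList.length u table s)
      (pvInnerB t t.toList.length u (back, reach) s).1 (pvInnerB t t.toList.length u (back, reach) s).2
    ∧ (pvInnerB t t.toList.length u (back, reach) s).2.getD u false = true := by
  obtain ⟨h1, h2, h3, h4, h5, h6, h7⟩ := h
  unfold pvInnerA pvInnerB
  by_cases hA : u + s.toList.length ≤ t.toList.length ∧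
      (PySem.Str.slice t (some (u : Int)) (some ((u + s.toList.length : Nat) : Int)) == s) = true
  · by_cases hE : s = ""
    · -- the empty string: A appends '' to its own row, B does nothing
      have hBc : ¬(¬s = "" ∧ u + s.toList.length ≤ t.toList.length ∧
          (PySem.Str.slice t (some (u : Int)) (some ((u + s.toList.length : Nat) : Int)) == s) = true) := by
        intro hc; exact hc.1 hE
      rw [if_pos hA, if_neg hBc]
      subst hE
      have hj : u + "".toList.length = u := by simp
      rw [hj]
      have hulen : u < table.length := by omega
      refine ⟨⟨by simp [h1], h2, h3, ?_, h5, h6, ?_⟩, hru⟩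
      · intro j hj'
        by_cases hju : j = u
        · subst hju
          rw [pvGetD_set_self _ _ _ _ hulen, hru]
          simp
        · rw [pvGetD_set_ne _ _ _ _ _ (fun e => hju e.symm)]
          exact h4 j hj'
      · intro hno; exact absurd hs hno
    · -- a nonempty matching string: both sides write position u + |s|
      have hl : 1 ≤ s.toList.length := by
        rcases Nat.eq_zero_or_pos s.toList.length with h0 | h0
        · exact absurd (String.toList_eq_nil_iff.mp (List.length_eq_zero_iff.mp h0)) hE
        · omega
      have hBc : ¬s = "" ∧ u + s.toList.length ≤ t.toList.length ∧
          (PySem.Str.slice t (some (u : Int)) (some ((u + s.toList.length : Nat) : Int)) == s) = true :=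
        ⟨hE, hA.1, hA.2⟩
      rw [if_pos hA, if_pos hBc]
      set l := s.toList.length with hldef
      set j0 := u + l with hj0def
      have hj0LT : j0 ≤ t.toList.length := hA.1
      have huj0 : u < j0 := by omega
      have hj0tb : j0 < table.length := by omega
      have hj0bk : j0 < back.length := by omega
      have hj0rc : j0 < reach.length := by omega
      refine ⟨⟨by simp [h1], by simp [h2], by simp [h3], ?_, ?_, ?_, ?_⟩, ?_⟩
      · -- reach/table lockstep
        intro j hj'
        by_cases hjj : j = j0
        · subst hjj
          rw [pvGetD_set_self _ _ _ _ hj0rc, pvGetD_set_self _ _ _ _ hj0tb]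
          simp
        · rw [pvGetD_set_ne _ _ _ _ _ (fun e => hjj e.symm),
            pvGetD_set_ne _ _ _ _ _ (fun e => hjj e.symm)]
          exact h4 j hj'
      · -- reachability is sound for constructibility
        intro j hj' hrj
        by_cases hjj : j = j0
        · subst hjj
          have hsl : (t.toList.drop u).take s.toList.length = s.toList := by
            have h' : PySem.Str.slice t (some (u : Int))
                (some ((u + s.toList.length : Nat) : Int)) = s := beq_iff_eq.mp hA.2
            have h2' := congrArg String.toList h'
            rw [PySem.Str.toList_slice, PySem.Chars.slice_eq_listSlice,
              PySem.List.slice_natCast] at h2'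
            simpa using h2'
          have hsl' : (t.toList.drop u).take l = s.toList := by rw [hldef]; exact hsl
          have htake : t.toList.take j0 = t.toList.take u ++ s.toList := by
            rw [hj0def, List.take_add, hsl']
          apply pvCM_mono ss (u + 1) j0 _ (by omega)
          rw [htake]
          exact pvCM_append ss u _ s hs hE (h5 u hu hru)
        · rw [pvGetD_set_ne _ _ _ _ _ (fun e => hjj e.symm)] at hrj
          exact h5 j hj' hrj
      · -- back-pointer bounds
        intro j s' hbs
        by_cases hjj : j = j0
        · subst hjj
          rw [pvGetD_set_self _ _ _ _ hj0bk] at hbs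
          obtain rfl : s' = s := by simpa using hbs.symm
          exact ⟨hl, by omega, by omega⟩
        · rw [pvGetD_set_ne _ _ _ _ _ (fun e => hjj e.symm)] at hbs
          exact h6 j s' hbs
      · -- value clause
        intro hno j hj'
        have hvu : ∃ vu, table.getD u none = some vu := by
          have := h4 u hu
          rw [hru] at this
          exact Option.isSome_iff_exists.mp this.symm
        obtain ⟨vu, hvu⟩ := hvu
        by_cases hjj : j = j0
        · subst hjj
          rw [pvGetD_set_self _ _ _ _ hj0tb]
          show some _ = pvRecF (back.set j0 (some s)) (t.toList.length + 1) j0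
          simp only [pvRecF]
          have hj00 : ¬ j0 = 0 := by omega
          rw [if_neg hj00, pvGetD_set_self _ _ _ _ hj0bk]
          simp only []
          have hcond : 1 ≤ s.toList.length ∧ s.toList.length ≤ j0 := ⟨hl, by omega⟩
          rw [if_pos hcond]
          have e1 : j0 - s.toList.length = u := by omega
          rw [e1, pvRecF_set_high back j0 (some s) _ u huj0,
            pvRecF_fuel back (t.toList.length) (t.toList.length + 1) u (by omega) (by omega),
            ← h7 hno u hu, hvu]
          simp
        · rw [pvGetD_set_ne _ _ _ _ _ (fun e => hjj e.symm), h7 hno j hj']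
          -- pvRecF is unchanged at positions other than j0
          show pvRecF back (t.toList.length + 1) j = pvRecF (back.set j0 (some s)) (t.toList.length + 1) j
          simp only [pvRecF]
          by_cases hj0' : j = 0
          · simp [hj0']
          · rw [if_neg hj0', if_neg hj0',
              pvGetD_set_ne back j0 j (some s) none (fun e => hjj e.symm)]
            cases hb : back.getD j none with
            | none => rfl
            | some s' =>
              simp only []
              by_cases hbd : 1 ≤ s'.toList.length ∧ s'.toList.length ≤ j
              · rw [if_pos hbd, if_pos hbd]
                have hlow := h6 j s' hb
                rw [pvRecF_set_high back j0 (some s) _ (j - s'.toList.length) (by omega)]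
              · rw [if_neg hbd, if_neg hbd]
      · -- reach[u] stays true
        rw [pvGetD_set_ne _ _ _ _ _ (by omega : j0 ≠ u)]
        exact hru
  · have hBc : ¬(¬s = "" ∧ u + s.toList.length ≤ t.toList.length ∧
        (PySem.Str.slice t (some (u : Int)) (some ((u + s.toList.length : Nat) : Int)) == s) = true) := by
      intro hc; exact hA ⟨hc.2.1, hc.2.2⟩
    rw [if_neg hA, if_neg hBc]
    exact ⟨⟨h1, h2, h3, h4, h5, h6, h7⟩, hru⟩

lemma pvInner_fold (t : String) (ss : List String) (u : Nat) (hu : u < t.toList.length + 1) :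
    ∀ (l : List String), (∀ x ∈ l, x ∈ ss) → ∀ table back reach,
      pvInv t ss u table back reach → reach.getD u false = true →
      pvInv t ss u (l.foldl (pvInnerA t t.toList.length u) table)
        (l.foldl (pvInnerB t t.toList.length u) (back, reach)).1
        (l.foldl (pvInnerB t t.toList.length u) (back, reach)).2
      ∧ (l.foldl (pvInnerB t t.toList.length u) (back, reach)).2.getD u false = true := by
  intro l
  induction l with
  | nil => intro _ table back reach h hr; exact ⟨h, hr⟩
  | cons s l ih =>
    intro hmem table back reach h hr
    obtain ⟨h', hr'⟩ := pvInner_step t ss u s (hmem s (by simp)) hu h hr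
    have := ih (fun x hx => hmem x (by simp [hx]))
      (pvInnerA t t.toList.length u table s)
      (pvInnerB t t.toList.length u (back, reach) s).1
      (pvInnerB t t.toList.length u (back, reach) s).2 h' hr'
    simpa [List.foldl_cons] using this

lemma pvStep_pres (t : String) (ss : List String) (u : Nat) (hu : u < t.toList.length + 1)
    {table back reach} (h : pvInv t ss u table back reach) :
    pvInv t ss (u + 1) (pvStepA t ss t.toList.length table u)
      (pvStepB t ss t.toList.length (back, reach) u).1
      (pvStepB t ss t.toList.length (back, reach) u).2 := by
  have hg := (h.2.2.2.1) u hu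
  unfold pvStepA pvStepB
  by_cases hr : reach.getD u false = true
  · rw [if_pos hr, if_pos (by rw [← hg]; exact hr)]
    exact pvInv_weaken t ss u
      (pvInner_fold t ss u hu ss (fun x hx => hx) table back reach h hr).1
  · have hg' : ¬ (table.getD u none).isSome = true := by rw [← hg]; exact hr
    rw [if_neg hr, if_neg hg']
    exact pvInv_weaken t ss u h

lemma pvFold_pres (t : String) (ss : List String) :
    ∀ (c u : Nat), u + c = t.toList.length + 1 → ∀ table back reach,
      pvInv t ss u table back reach →
      pvInv t ss (t.toList.length + 1)
        ((List.range' u c).foldl (pvStepA t ss t.toList.length) table)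
        ((List.range' u c).foldl (pvStepB t ss t.toList.length) (back, reach)).1
        ((List.range' u c).foldl (pvStepB t ss t.toList.length) (back, reach)).2 := by
  intro c
  induction c with
  | zero =>
    intro u hu table back reach h
    obtain rfl : u = t.toList.length + 1 := by omega
    simpa using h
  | succ c ih =>
    intro u hu table back reach h
    have hult : u < t.toList.length + 1 := by omega
    have h' := pvStep_pres t ss u hult h
    have := ih (u + 1) (by omega) (pvStepA t ss t.toList.length table u)
      (pvStepB t ss t.toList.length (back, reach) u).1
      (pvStepB t ss t.toList.length (back, reach) u).2 h'
    simpa [List.range'_succ] using this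

lemma pvInit_inv (t : String) (ss : List String) :
    pvInv t ss 0 (some [] :: List.replicate t.toList.length none)
      (List.replicate (t.toList.length + 1) none)
      ((List.replicate (t.toList.length + 1) false).set 0 true) := by
  refine ⟨by simp, by simp, by simp, ?_, ?_, ?_, ?_⟩
  · intro j hj
    cases j with
    | zero =>
      have h0 : (0 : Nat) < (List.replicate (t.toList.length + 1) false).length := by simp
      simp [List.getD_eq_getElem?_getD]
    | succ k =>
      have hne : (0 : Nat) ≠ k + 1 := by omega
      have hk : k < t.length := by
        have := String.length_toList (s := t); omega
      simp [List.getD_eq_getElem?_getD, hk]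
  · intro j hj hr
    cases j with
    | zero => simp [pvCM]
    | succ k =>
      exfalso
      have hne : (0 : Nat) ≠ k + 1 := by omega
      simp only [List.getD_eq_getElem?_getD, List.getElem?_set_ne hne, List.getElem?_replicate] at hr
      split at hr <;> simp_all
  · intro j s hj
    exfalso
    simp only [List.getD_eq_getElem?_getD, List.getElem?_replicate] at hj
    split at hj <;> simp_all
  · intro _ j hj
    have hnone : ∀ m, (List.replicate (t.toList.length + 1) (none : Option String)).getD m none = none := by
      intro m
      simp only [List.getD_eq_getElem?_getD, List.getElem?_replicate]
      split <;> rfl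
    cases j with
    | zero =>
      simp [pvRecF]
    | succ k =>
      have hk : k < t.length := by
        have := String.length_toList (s := t); omega
      simp only [List.getD_cons_succ]
      simp [pvRecF, List.getD_eq_getElem?_getD, hk]

lemma pvRecon_of_recF (back : List (Option String)) :
    ∀ f f' j acc v, f ≤ f' → pvRecF back f j = some v →
      pvReconAux back f' j acc = v ++ acc.reverse := by
  intro f
  induction f with
  | zero => intro f' j acc v _ h; simp [pvRecF] at h
  | succ f ih =>
    intro f' j acc v hle h
    match f', hle with
    | f' + 1, _ =>
      show pvReconAux back (f' + 1) j acc = v ++ acc.reverse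
      simp only [pvRecF, String.length_toList] at h
      simp only [pvReconAux, String.length_toList, PySem.List.pyGetD_natCast]
      by_cases hj : j = 0
      · simp only [if_pos hj] at h ⊢
        obtain rfl : v = [] := by simpa using h.symm
        simp
      · simp only [if_neg hj] at h ⊢
        cases hb : back.getD j none with
        | none => rw [hb] at h; exact absurd h (by simp)
        | some s =>
          rw [hb] at h
          simp only [] at h ⊢  -- ι-reduces the match on `some s`
          by_cases hbd : 1 ≤ s.length ∧ s.length ≤ j
          · rw [if_pos hbd] at h
            cases hrec : pvRecF back f (j - s.length) with
            | none => rw [hrec] at h; exact absurd h (by simp)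
            | some w =>
              rw [hrec] at h
              obtain rfl : v = w ++ [s] := by simpa using h.symm
              rw [ih f' (j - s.length) (acc ++ [s]) w (by omega) hrec]
              simp
          · rw [if_neg hbd] at h; exact absurd h (by simp)

lemma pvMain (t : String) (ss : List String) (hND : ¬ D_how_construct t ss) :
    how_construct t ss = how_construct_alt t ss := by
  rw [pvBridgeA, pvBridgeB, List.range_eq_range']
  obtain ⟨h1, h2, h3, h4, h5, h6, h7⟩ :=
    pvFold_pres t ss (t.toList.length + 1) 0 (by omega) _ _ _ (pvInit_inv t ss)
  have hLT : t.toList.length < t.toList.length + 1 := by omega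
  have hls := h4 t.toList.length hLT
  cases hr : ((List.range' 0 (t.toList.length + 1)).foldl (pvStepB t ss t.toList.length)
      (List.replicate (t.toList.length + 1) none,
        (List.replicate (t.toList.length + 1) false).set 0 true)).2.getD t.toList.length false with
  | false =>
    rw [if_neg (by simp)]
    rw [hr] at hls
    exact Option.not_isSome_iff_eq_none.mp (by rw [← hls]; simp)
  | true =>
    rw [if_pos (by simp)]
    by_cases hmem : "" ∈ ss
    · have hc := h5 t.toList.length hLT hr
      rw [List.take_length] at hc
      exact absurd ⟨hmem, hc⟩ hND
    · have hval := h7 hmem t.toList.length hLT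
      rw [hr] at hls
      obtain ⟨v, hv⟩ := Option.isSome_iff_exists.mp hls.symm
      rw [hval] at hv
      rw [hval, hv,
        pvRecon_of_recF _ (t.toList.length + 1) (t.toList.length + 1) t.toList.length [] v le_rfl hv]
      simp

-- ===== VERDICT (by name: the statement is the Claim_ definition above) =====
theorem how_construct_spec : Claim_unchanged_how_construct := by
  intro t ss _ 
  unfold Spec_how_construct
  intro hND
  exact pvMain t ss hND

theorem how_construct_changed : Claim_changed_how_construct := by
  unfold Claim_changed_how_construct; decide
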